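-- pv_equiv track=rewrite | github.com/nicolfava/ProgrammingLab | esame.py | hourly_trend_changes
-- ===== SOURCE A (Python) =====
-- def hourly_trend_changes(time_series_list):
--     temperature_trend_inversions = []
--     hourly_temps_list = []
--     # lista con tutti i dati organizzati per ora in cui sono stati registrati
--
--     temporary_temps_list = []
--     # i dati di una singola ora vengono memorizzati temporaneamente in questa lista
--     # per poi essere inseriti nella lista generale (hourly_temps_list)
--
--     for i in range(len(time_series_list) - 1):
--         temporary_temps_list.append(time_series_list[i][1])
--
--         if int(time_series_list[i][0] / 3600) != int(time_series_list[i + 1][0] / 3600):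
--             hourly_temps_list.append(temporary_temps_list)
--             temporary_temps_list = []
--
--     temporary_temps_list.append(time_series_list[-1][1])
--     hourly_temps_list.append(temporary_temps_list)
--     # inserimento dell'ultimo set (ultima ora) di dati nella lista
--
--     for i in range(len(hourly_temps_list)):
--         check_list = []  # lista con i valori necessari per il calcolo delle inversioni
--         counter = 0
--         trend_checker_list = []
--         # lista ausiliaria che verrà utilizzata per il conteggio delle inversioni
--
--         if i > 0:
--             check_list.append(hourly_temps_list[i - 1][-1])
--         # inserimento dell'ultimo valore dell'ora precedente
--
--         for j in hourly_temps_list[i]: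
--             check_list.append(j)
--         # inserimento di tutti i valori dell'ora attuale
--
--         for k in range(1, len(check_list)):
--             if check_list[k] < check_list[k - 1]:
--                 trend_checker_list.append(0)
--                 # se il trend è negativo (temperatura diminuisce) il valore è 0
--
--             if check_list[k] > check_list[k - 1]:
--                 trend_checker_list.append(1)
--                 # se il trend è positivo (temperatura aumenta) il valore è 1
--         # (i casi in cui la temperatura rimane costante nel tempo vengono ignorati)
--
--         for h in range(len(trend_checker_list) - 1):
--             if trend_checker_list[h] != trend_checker_list[h + 1]:
--                 counter += 1
--                 # conteggio delle inversioni di trend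
--
--         temperature_trend_inversions.append(counter)
--
--     return temperature_trend_inversions
-- ===== SOURCE B (Python) =====
-- def _runs(samples):
--     # two-pointer grouping: each run = maximal block of consecutive samples
--     # sharing the same hour key; collect only the temperatures
--     runs = []
--     i = 0
--     n = len(samples)
--     while i < n:
--         key = int(samples[i][0] / 3600)
--         j = i
--         vals = []
--         while j < n and int(samples[j][0] / 3600) == key:
--             vals.append(samples[j][1])
--             j += 1
--         runs.append(vals)
--         i = j
--     return runs
--
--
-- def _count(prev, values):
--     # one pass: sign of each consecutive step (1 up, 0 down, skip equal),
--     # counting each time a new non-zero direction differs from the last one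
--     counter = 0
--     last_dir = None
--     p = prev
--     for v in values:
--         if p is not None:
--             if v > p:
--                 d = 1
--             elif v < p:
--                 d = 0
--             else:
--                 d = None
--             if d is not None:
--                 if last_dir is not None and d != last_dir:
--                     counter += 1
--                 last_dir = d
--         p = v
--     return counter
--
--
-- def hourly_trend_changes(time_series_list):
--     result = []
--     prev = None  # last temperature of the previous run
--     for values in _runs(time_series_list):
--         result.append(_count(prev, values))
--         prev = values[-1]
--     return result
-- ===== Notes on version B (the rewrite author's own statement) =====
-- stated objective: simpler
-- what changed: B splits the series into consecutive same-hour runs with a two-pointer scanner and counts each run's inversions in a single stateful pass (previous value + last direction), replacing A's three indexed passes (check_list, trend_checker_list, adjacent-diff count) per hour block.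
-- outside the precondition, e.g. on hourly_trend_changes([]): A raises IndexError, B returns []
-- crash fix: On the empty list A raises IndexError (time_series_list[-1]); B returns []. — e.g. on hourly_trend_changes([]): A raises IndexError, B returns []
import Mathlib
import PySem

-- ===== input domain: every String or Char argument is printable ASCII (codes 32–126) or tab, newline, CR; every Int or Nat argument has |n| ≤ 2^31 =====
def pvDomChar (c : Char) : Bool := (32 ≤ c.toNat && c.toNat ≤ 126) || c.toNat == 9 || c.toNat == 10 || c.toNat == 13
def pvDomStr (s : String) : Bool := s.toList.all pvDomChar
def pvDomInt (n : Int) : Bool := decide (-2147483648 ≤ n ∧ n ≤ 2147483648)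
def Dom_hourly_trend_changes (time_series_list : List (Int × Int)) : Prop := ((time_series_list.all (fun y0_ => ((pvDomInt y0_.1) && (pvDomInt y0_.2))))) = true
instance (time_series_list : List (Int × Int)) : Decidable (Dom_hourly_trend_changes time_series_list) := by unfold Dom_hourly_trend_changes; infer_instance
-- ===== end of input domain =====

-- B regroups the series with a two-pointer run scanner and counts each run's trend
-- inversions in a single stateful pass; objective: simpler (one pass per run instead of
-- A's three indexed passes). Equal return values on every nonempty input; on the empty
-- list A raises IndexError while B returns [].

-- int(t/3600) in Python truncates the float quotient toward zero; for |t| <= 2^31 (Dom)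
-- the float division error is far below 1/3600, so this is exactly Int.tdiv.

-- ===== PORT A =====
def pvHourKey (t : Int) : Int := t.tdiv 3600

def hourly_trend_changes (time_series_list : List (Int × Int)) : List Int :=
  let n : Int := time_series_list.length
  let st := (PySem.List.pyRange 0 (n - 1) 1).foldl
    (fun (st : List (List Int) × List Int) i =>
      let temp' := st.2 ++ [(PySem.List.pyGetD time_series_list i (0, 0)).2]
      if pvHourKey (PySem.List.pyGetD time_series_list i (0, 0)).1
          ≠ pvHourKey (PySem.List.pyGetD time_series_list (i + 1) (0, 0)).1 then
        (st.1 ++ [temp'], ([] : List Int))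
      else
        (st.1, temp'))
    ([], [])
  let temp := st.2 ++ [(PySem.List.pyGetD time_series_list (-1) (0, 0)).2]
  let hourly := st.1 ++ [temp]
  (PySem.List.pyRange 0 (hourly.length : Int) 1).foldl
    (fun acc i =>
      let check : List Int :=
        (if i > 0 then [PySem.List.pyGetD (PySem.List.pyGetD hourly (i - 1) []) (-1) 0] else [])
          ++ (PySem.List.pyGetD hourly i []).foldl (fun c j => c ++ [j]) []
      let trend : List Int := (PySem.List.pyRange 1 (check.length : Int) 1).foldl
        (fun tl k =>
          let tl' := if PySem.List.pyGetD check k 0 < PySem.List.pyGetD check (k - 1) 0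
            then tl ++ [(0 : Int)] else tl
          if PySem.List.pyGetD check k 0 > PySem.List.pyGetD check (k - 1) 0
            then tl' ++ [(1 : Int)] else tl')
        []
      let counter : Int := (PySem.List.pyRange 0 ((trend.length : Int) - 1) 1).foldl
        (fun c h =>
          if PySem.List.pyGetD trend h 0 ≠ PySem.List.pyGetD trend (h + 1) 0 then c + 1 else c)
        0
      acc ++ [counter])
    []

-- ===== PORT B =====
-- inner while of _runs: collect temperatures while the hour key matches, return the rest
def pvTakeRun (k : Int) : List (Int × Int) → List Int × List (Int × Int)
  | [] => ([], [])
  | (t, v) :: rest =>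
    if pvHourKey t = k then
      let p := pvTakeRun k rest
      (v :: p.1, p.2)
    else ([], (t, v) :: rest)

lemma pvTakeRun_length (k : Int) :
    ∀ ts : List (Int × Int), (pvTakeRun k ts).2.length ≤ ts.length := by
  intro ts
  induction ts with
  | nil => simp [pvTakeRun]
  | cons x rest ih =>
    obtain ⟨t, v⟩ := x
    simp only [pvTakeRun]
    split
    · simpa using Nat.le_succ_of_le ih
    · simp

-- outer while of _runs
def pvRuns : List (Int × Int) → List (List Int)
  | [] => []
  | (t, v) :: rest =>
    let p := pvTakeRun (pvHourKey t) rest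
    (v :: p.1) :: pvRuns p.2
termination_by l => l.length
decreasing_by
  simpa using Nat.lt_succ_of_le (pvTakeRun_length (pvHourKey t) rest)

-- _count loop body; state = (counter, last_dir, previous value)
def pvCountStep (st : Int × Option Int × Option Int) (v : Int) :
    Int × Option Int × Option Int :=
  match st.2.2 with
  | none => (st.1, st.2.1, some v)
  | some p =>
    let d : Option Int := if v > p then some 1 else if v < p then some 0 else none
    match d with
    | none => (st.1, st.2.1, some v)
    | some dd =>
      ((if st.2.1 ≠ none ∧ st.2.1 ≠ some dd then st.1 + 1 else st.1), some dd, some v)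

def pvCount (prev : Option Int) (values : List Int) : Int :=
  (values.foldl pvCountStep (0, none, prev)).1

def hourly_trend_changes_alt (time_series_list : List (Int × Int)) : List Int :=
  ((pvRuns time_series_list).foldl
    (fun (st : List Int × Option Int) values =>
      (st.1 ++ [pvCount st.2 values], PySem.List.pyGet? values (-1)))
    ([], none)).1

-- ===== glue =====

-- ===== PRECONDITION & SPEC =====
-- A indexes time_series_list[-1] unconditionally and so raises IndexError on the empty
-- list; Pre_ excludes exactly that input and nothing else.
def Pre_hourly_trend_changes (time_series_list : List (Int × Int)) : Prop :=
  time_series_list ≠ []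
instance (time_series_list : List (Int × Int)) : Decidable (Pre_hourly_trend_changes time_series_list) := by unfold Pre_hourly_trend_changes; infer_instance

def pvWitness_hourly_trend_changes : (List (Int × Int)) := [(0, 5), (100, 7), (4000, 6)]

-- A raises IndexError on the empty list; B returns [].
def Raises_hourly_trend_changes (time_series_list : List (Int × Int)) : Prop :=
  time_series_list = []
instance (time_series_list : List (Int × Int)) : Decidable (Raises_hourly_trend_changes time_series_list) := by unfold Raises_hourly_trend_changes; infer_instance
def pvRaiseWitness_hourly_trend_changes : (List (Int × Int)) := []
def pvRaiseWitnessOut_hourly_trend_changes : List Int := []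

def Spec_hourly_trend_changes (time_series_list : List (Int × Int)) (out : List Int) : Prop := out = hourly_trend_changes_alt time_series_list
instance (time_series_list : List (Int × Int)) (out : List Int) : Decidable (Spec_hourly_trend_changes time_series_list out) := by unfold Spec_hourly_trend_changes; infer_instance

-- ===== CLAIM (what is proved, stated in full; the proofs are below) =====
def Claim_equal_hourly_trend_changes : Prop := ∀ (time_series_list : List (Int × Int)), Dom_hourly_trend_changes time_series_list → Pre_hourly_trend_changes time_series_list → Spec_hourly_trend_changes time_series_list (hourly_trend_changes time_series_list)

def Claim_raises_hourly_trend_changes : Prop := (∀ (time_series_list : List (Int × Int)), Dom_hourly_trend_changes time_series_list → Raises_hourly_trend_changes time_series_list → ¬ Pre_hourly_trend_changes time_series_list) ∧ (Dom_hourly_trend_changes (pvRaiseWitness_hourly_trend_changes) ∧ Raises_hourly_trend_changes (pvRaiseWitness_hourly_trend_changes) ∧ hourly_trend_changes_alt (pvRaiseWitness_hourly_trend_changes) = pvRaiseWitnessOut_hourly_trend_changes)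

-- ===== LEMMAS AND PROOFS =====

def pvPairsRec {α σ : Type} (g : σ → α → α → σ) : List α → σ → σ
  | x :: y :: r, s => pvPairsRec g (y :: r) (g s x y)
  | _, s => s

lemma pairs_fold {α σ : Type} (d : α) (g : σ → α → α → σ) :
    ∀ (ts : List α) (init : σ),
      (List.range (ts.length - 1)).foldl
          (fun st k => g st (ts.getD k d) (ts.getD (k + 1) d)) init
        = pvPairsRec g ts init := by
  intro ts
  induction ts with
  | nil => intro init; simp [pvPairsRec]
  | cons x rest ih =>
    cases rest with
    | nil => intro init; simp [pvPairsRec]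
    | cons y r =>
      intro init
      have hlen : (x :: y :: r).length - 1 = (y :: r).length - 1 + 1 := by simp
      rw [hlen, List.range_succ_eq_map, List.foldl_cons, List.foldl_map]
      simp only [List.getD_cons_zero, List.getD_cons_succ, Nat.succ_eq_add_one]
      rw [pvPairsRec]
      rw [← ih (g init x y)]
      rfl

lemma bridge_range {σ : Type} (a b : Int) (f : σ → Int → σ) (init : σ) :
    (PySem.List.pyRange a b 1).foldl f init
      = (List.range (b - a).toNat).foldl (fun s (k : Nat) => f s (a + (k : Int))) init := by
  rw [PySem.List.pyRange_one]; simp [List.foldl_map]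

def pvSgnFrom : Option Int → List Int → List Int
  | _, [] => []
  | none, v :: r => pvSgnFrom (some v) r
  | some p, v :: r =>
    (if v > p then [(1 : Int)] else if v < p then [(0 : Int)] else []) ++ pvSgnFrom (some v) r

def pvCntFrom : Option Int → List Int → Int
  | _, [] => 0
  | none, s :: r => pvCntFrom (some s) r
  | some x, s :: r => (if x ≠ s then 1 else 0) + pvCntFrom (some s) r

lemma pairsRec_sgn :
    ∀ (c tl : List Int),
      pvPairsRec (fun tl (x y : Int) =>
          let tl' := if y < x then tl ++ [(0 : Int)] else tl
          if y > x then tl' ++ [(1 : Int)] else tl') c tl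
        = tl ++ pvSgnFrom none c := by
  intro c
  induction c with
  | nil => intro tl; simp [pvPairsRec, pvSgnFrom]
  | cons x rest ih =>
    cases rest with
    | nil => intro tl; simp [pvPairsRec, pvSgnFrom]
    | cons y r =>
      intro tl
      rw [pvPairsRec, ih]
      show (if y > x then (if y < x then tl ++ [(0:Int)] else tl) ++ [(1:Int)]
            else if y < x then tl ++ [(0:Int)] else tl) ++ pvSgnFrom none (y :: r)
          = tl ++ pvSgnFrom none (x :: y :: r)
      have h1 : pvSgnFrom none (x :: y :: r)
          = (if y > x then [(1:Int)] else if y < x then [(0:Int)] else []) ++ pvSgnFrom (some y) r := by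
        simp [pvSgnFrom]
      have h2 : pvSgnFrom none (y :: r) = pvSgnFrom (some y) r := by simp [pvSgnFrom]
      rw [h1, h2]
      rcases lt_trichotomy x y with h | h | h
      · simp [h, not_lt_of_gt h]
      · simp [h]
      · simp [h, not_lt_of_gt h]

lemma pairsRec_cnt :
    ∀ (l : List Int) (c0 : Int),
      pvPairsRec (fun (c : Int) (x y : Int) => if x ≠ y then c + 1 else c) l c0
        = c0 + pvCntFrom none l := by
  intro l
  induction l with
  | nil => intro c0; simp [pvPairsRec, pvCntFrom]
  | cons x rest ih =>
    cases rest with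
    | nil => intro c0; simp [pvPairsRec, pvCntFrom]
    | cons y r =>
      intro c0
      rw [pvPairsRec, ih]
      have h1 : pvCntFrom none (x :: y :: r)
          = (if x ≠ y then 1 else 0) + pvCntFrom (some y) r := by simp [pvCntFrom]
      have h2 : pvCntFrom none (y :: r) = pvCntFrom (some y) r := by simp [pvCntFrom]
      rw [h1, h2]
      by_cases h : x = y <;> simp [h] <;> ring

lemma pvCount_inv :
    ∀ (values : List Int) (c : Int) (ls p : Option Int),
      (values.foldl pvCountStep (c, ls, p)).1 = c + pvCntFrom ls (pvSgnFrom p values) := by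
  intro values
  induction values with
  | nil => intro c ls p; simp [pvSgnFrom, pvCntFrom]
  | cons v r ih =>
    intro c ls p
    rw [List.foldl_cons]
    cases p with
    | none =>
      rw [show pvCountStep (c, ls, none) v = (c, ls, some v) from by simp [pvCountStep]]
      rw [show pvSgnFrom none (v :: r) = pvSgnFrom (some v) r from by simp [pvSgnFrom]]
      exact ih c ls (some v)
    | some q =>
      rcases lt_trichotomy q v with h | h | h
      · have hgt : v > q := h
        rw [show pvCountStep (c, ls, some q) v
            = ((if ls ≠ none ∧ ls ≠ some 1 then c + 1 else c), some 1, some v) from by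
          simp [pvCountStep, hgt]]
        rw [show pvSgnFrom (some q) (v :: r) = 1 :: pvSgnFrom (some v) r from by
          simp [pvSgnFrom, hgt]]
        rw [ih]
        cases ls with
        | none => simp [pvCntFrom]
        | some x =>
          by_cases hx : x = 1
          · simp [pvCntFrom, hx]
          · simp [pvCntFrom, hx]; ring
      · have hsgn : pvSgnFrom (some q) (v :: r) = pvSgnFrom (some v) r := by
          simp [pvSgnFrom, h]
        rw [show pvCountStep (c, ls, some q) v = (c, ls, some v) from by
          simp [pvCountStep, h], hsgn, ih]
      · have hlt : v < q := h
        rw [show pvCountStep (c, ls, some q) v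
            = ((if ls ≠ none ∧ ls ≠ some 0 then c + 1 else c), some 0, some v) from by
          simp [pvCountStep, hlt, not_lt_of_gt hlt]]
        rw [show pvSgnFrom (some q) (v :: r) = 0 :: pvSgnFrom (some v) r from by
          simp [pvSgnFrom, hlt, not_lt_of_gt hlt]]
        rw [ih]
        cases ls with
        | none => simp [pvCntFrom]
        | some x =>
          by_cases hx : x = 0
          · simp [pvCntFrom, hx]
          · simp [pvCntFrom, hx]; ring

lemma pvCount_eq (prev : Option Int) (values : List Int) :
    pvCount prev values = pvCntFrom none (pvSgnFrom prev values) := by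
  unfold pvCount
  rw [pvCount_inv]
  cases prev <;> simp [pvSgnFrom]

lemma pvRuns_cons (t v : Int) (rest : List (Int × Int)) :
    pvRuns ((t, v) :: rest)
      = (v :: (pvTakeRun (pvHourKey t) rest).1) :: pvRuns (pvTakeRun (pvHourKey t) rest).2 := by
  rw [pvRuns]

-- every run produced by pvRuns is nonempty

lemma pvRuns_ne_nil : ∀ (ts : List (Int × Int)), ∀ x ∈ pvRuns ts, x ≠ [] := by
  intro ts
  induction ts using pvRuns.induct with
  | case1 => simp [pvRuns]
  | case2 t v rest p ih =>
    rw [pvRuns_cons]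
    intro x hx
    rcases List.mem_cons.mp hx with h | h
    · simp [h]
    · exact ih x h

def pvG1 (st : List (List Int) × List Int) (x y : Int × Int) : List (List Int) × List Int :=
  if pvHourKey x.1 ≠ pvHourKey y.1 then (st.1 ++ [st.2 ++ [x.2]], ([] : List Int))
  else (st.1, st.2 ++ [x.2])

lemma pyGetD_last_cons_cons (x y : Int × Int) (r : List (Int × Int)) (d : Int × Int) :
    PySem.List.pyGetD (x :: y :: r) (-1) d = PySem.List.pyGetD (y :: r) (-1) d := by
  rw [PySem.List.pyGetD_neg_one (x :: y :: r) d (by simp),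
      PySem.List.pyGetD_neg_one (y :: r) d (by simp)]
  exact List.getLast_cons (by simp)

lemma phase1_eq :
    ∀ (rest : List (Int × Int)) (t v : Int) (acc : List (List Int)) (temp : List Int),
      (pvPairsRec pvG1 ((t, v) :: rest) (acc, temp)).1
          ++ [(pvPairsRec pvG1 ((t, v) :: rest) (acc, temp)).2
              ++ [(PySem.List.pyGetD ((t, v) :: rest) (-1) (0, 0)).2]]
        = acc ++ (temp ++ v :: (pvTakeRun (pvHourKey t) rest).1)
            :: pvRuns (pvTakeRun (pvHourKey t) rest).2 := by
  intro rest
  induction rest with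
  | nil =>
    intro t v acc temp
    rw [show PySem.List.pyGetD [(t, v)] (-1) (0, 0) = (t, v) from by
      rw [PySem.List.pyGetD_neg_one [(t, v)] (0, 0) (by simp)]; simp]
    simp [pvPairsRec, pvTakeRun, pvRuns]
  | cons x r ih =>
    obtain ⟨t2, v2⟩ := x
    intro t v acc temp
    rw [show pvPairsRec pvG1 ((t, v) :: (t2, v2) :: r) (acc, temp)
        = pvPairsRec pvG1 ((t2, v2) :: r) (pvG1 (acc, temp) (t, v) (t2, v2)) from rfl]
    rw [pyGetD_last_cons_cons]
    by_cases h : pvHourKey t = pvHourKey t2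
    · have hg : pvG1 (acc, temp) (t, v) (t2, v2) = (acc, temp ++ [v]) := by
        simp [pvG1, h]
      rw [hg, ih t2 v2 acc (temp ++ [v])]
      have htr : pvTakeRun (pvHourKey t) ((t2, v2) :: r)
          = (v2 :: (pvTakeRun (pvHourKey t2) r).1, (pvTakeRun (pvHourKey t2) r).2) := by
        simp [pvTakeRun, h]
      rw [htr]
      simp
    · have hg : pvG1 (acc, temp) (t, v) (t2, v2) = (acc ++ [temp ++ [v]], []) := by
        simp [pvG1, h]
      rw [hg, ih t2 v2 (acc ++ [temp ++ [v]]) []]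
      have htr : pvTakeRun (pvHourKey t) ((t2, v2) :: r) = ([], (t2, v2) :: r) := by
        simp only [pvTakeRun, if_neg (fun hh => h (Eq.symm hh))]
      rw [htr, pvRuns_cons]
      simp

def pvGoRec : List (List Int) → Option Int → List Int
  | [], _ => []
  | r :: rest, prev => pvCount prev r :: pvGoRec rest (PySem.List.pyGet? r (-1))

lemma altFold_eq :
    ∀ (runs : List (List Int)) (res0 : List Int) (prev : Option Int),
      (runs.foldl
        (fun (st : List Int × Option Int) values =>
          (st.1 ++ [pvCount st.2 values], PySem.List.pyGet? values (-1)))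
        (res0, prev)).1 = res0 ++ pvGoRec runs prev := by
  intro runs
  induction runs with
  | nil => intro res0 prev; simp [pvGoRec]
  | cons r rest ih =>
    intro res0 prev
    rw [List.foldl_cons, ih]
    simp [pvGoRec]

lemma pyGet?_of_ne_nil (l : List Int) (h : l ≠ []) :
    PySem.List.pyGet? l (-1) = some (PySem.List.pyGetD l (-1) 0) := by
  rw [PySem.List.pyGet?_neg_one, PySem.List.pyGetD_neg_one l 0 h]
  exact List.getLast?_eq_getLast h

def pvGO (acc : List Int) (x y : List Int) : List Int :=
  acc ++ [pvCount (some (PySem.List.pyGetD x (-1) 0)) y]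

lemma outer_rec :
    ∀ (rl : List (List Int)) (h0 : List Int) (acc : List Int), h0 ≠ [] →
      (∀ x ∈ rl, x ≠ []) →
      pvPairsRec pvGO (h0 :: rl) acc
        = acc ++ pvGoRec rl (some (PySem.List.pyGetD h0 (-1) 0)) := by
  intro rl
  induction rl with
  | nil => intro h0 acc _ _; simp [pvPairsRec, pvGoRec]
  | cons h1 rest ih =>
    intro h0 acc hne hall
    rw [show pvPairsRec pvGO (h0 :: h1 :: rest) acc
        = pvPairsRec pvGO (h1 :: rest) (pvGO acc h0 h1) from rfl]
    rw [ih h1 (pvGO acc h0 h1) (hall h1 (by simp)) (fun x hx => hall x (by simp [hx]))]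
    rw [pvGoRec]
    rw [pyGet?_of_ne_nil h1 (hall h1 (by simp))]
    simp [pvGO]

def pvA1 (ts : List (Int × Int)) : List (List Int) :=
  let st := (PySem.List.pyRange 0 ((ts.length : Int) - 1) 1).foldl
    (fun (st : List (List Int) × List Int) i =>
      pvG1 st (PySem.List.pyGetD ts i (0, 0)) (PySem.List.pyGetD ts (i + 1) (0, 0)))
    ([], [])
  st.1 ++ [st.2 ++ [(PySem.List.pyGetD ts (-1) (0, 0)).2]]

def pvCounterA (hourly : List (List Int)) (i : Int) : Int :=
  let check : List Int :=
    (if i > 0 then [PySem.List.pyGetD (PySem.List.pyGetD hourly (i - 1) []) (-1) 0] else [])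
      ++ (PySem.List.pyGetD hourly i []).foldl (fun c j => c ++ [j]) []
  let trend : List Int := (PySem.List.pyRange 1 (check.length : Int) 1).foldl
    (fun tl k =>
      let tl' := if PySem.List.pyGetD check k 0 < PySem.List.pyGetD check (k - 1) 0
        then tl ++ [(0 : Int)] else tl
      if PySem.List.pyGetD check k 0 > PySem.List.pyGetD check (k - 1) 0
        then tl' ++ [(1 : Int)] else tl')
    []
  (PySem.List.pyRange 0 ((trend.length : Int) - 1) 1).foldl
    (fun c h =>
      if PySem.List.pyGetD trend h 0 ≠ PySem.List.pyGetD trend (h + 1) 0 then c + 1 else c)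
    0

def pvA2 (hourly : List (List Int)) : List Int :=
  (PySem.List.pyRange 0 (hourly.length : Int) 1).foldl
    (fun acc i => acc ++ [pvCounterA hourly i]) []

lemma port_decomp (ts : List (Int × Int)) :
    hourly_trend_changes ts = pvA2 (pvA1 ts) := rfl

lemma pvA1_eq_runs (ts : List (Int × Int)) (h : ts ≠ []) : pvA1 ts = pvRuns ts := by
  obtain ⟨⟨t, v⟩, rest, rfl⟩ : ∃ x r, ts = x :: r := by
    cases ts with
    | nil => exact absurd rfl h
    | cons x r => exact ⟨x, r, rfl⟩
  unfold pvA1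
  rw [bridge_range]
  have htn : ((((t, v) :: rest).length : Int) - 1 - 0).toNat = ((t, v) :: rest).length - 1 := by
    simp
  rw [htn]
  rw [List.foldl_ext _ _
    (g := fun st (k : Nat) =>
      pvG1 st (((t, v) :: rest).getD k (0, 0)) (((t, v) :: rest).getD (k + 1) (0, 0)))
    (by
      intro a k _
      simp only [zero_add]
      rw [show (k : Int) + 1 = (((k + 1 : Nat)) : Int) from by push_cast; ring]
      rw [PySem.List.pyGetD_natCast, PySem.List.pyGetD_natCast])]
  rw [pairs_fold]
  rw [show ∀ (p : List (List Int) × List Int) (z : List Int), p.1 ++ [p.2 ++ z] =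
      (p.1, p.2).1 ++ [(p.1, p.2).2 ++ z] from fun p z => rfl]
  rw [phase1_eq rest t v [] []]
  rw [pvRuns_cons]
  simp

lemma foldl_app_singleton : ∀ (l acc : List Int), l.foldl (fun c j => c ++ [j]) acc = acc ++ l := by
  intro l
  induction l with
  | nil => simp
  | cons x r ih => intro acc; rw [List.foldl_cons, ih]; simp

lemma trend_eq (check : List Int) :
    (PySem.List.pyRange 1 (check.length : Int) 1).foldl
      (fun tl k =>
        let tl' := if PySem.List.pyGetD check k 0 < PySem.List.pyGetD check (k - 1) 0
          then tl ++ [(0 : Int)] else tl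
        if PySem.List.pyGetD check k 0 > PySem.List.pyGetD check (k - 1) 0
          then tl' ++ [(1 : Int)] else tl')
      []
    = pvSgnFrom none check := by
  rw [bridge_range]
  have htn : (((check.length : Int)) - 1).toNat = check.length - 1 := by simp
  rw [htn]
  rw [List.foldl_ext _ _
    (g := fun tl (k : Nat) =>
      let tl' := if check.getD (k + 1) 0 < check.getD k 0 then tl ++ [(0 : Int)] else tl
      if check.getD (k + 1) 0 > check.getD k 0 then tl' ++ [(1 : Int)] else tl')
    (by
      intro a k _
      have h1 : (1 : Int) + (k : Int) = (((k + 1 : Nat)) : Int) := by push_cast; ring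
      have h2 : (1 : Int) + (k : Int) - 1 = ((k : Nat) : Int) := by push_cast; ring
      rw [h2]  -- rewrite the (i - 1) occurrence first
      rw [h1]
      rw [PySem.List.pyGetD_natCast, PySem.List.pyGetD_natCast])]
  have hp := pairs_fold (0 : Int)
    (fun (tl : List Int) (x y : Int) =>
      let tl' := if y < x then tl ++ [(0 : Int)] else tl
      if y > x then tl' ++ [(1 : Int)] else tl') check []
  rw [pairsRec_sgn] at hp
  simpa using hp

lemma cnt_eq (trend : List Int) :
    (PySem.List.pyRange 0 ((trend.length : Int) - 1) 1).foldl
      (fun c h =>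
        if PySem.List.pyGetD trend h 0 ≠ PySem.List.pyGetD trend (h + 1) 0 then c + 1 else c)
      0
    = pvCntFrom none trend := by
  rw [bridge_range]
  have htn : (((trend.length : Int)) - 1 - 0).toNat = trend.length - 1 := by simp
  rw [htn]
  rw [List.foldl_ext _ _
    (g := fun (c : Int) (k : Nat) =>
      if trend.getD k 0 ≠ trend.getD (k + 1) 0 then c + 1 else c)
    (by
      intro a k _
      simp only [zero_add]
      rw [show (k : Int) + 1 = (((k + 1 : Nat)) : Int) from by push_cast; ring]
      rw [PySem.List.pyGetD_natCast, PySem.List.pyGetD_natCast])]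
  have hp := pairs_fold (0 : Int)
    (fun (c : Int) (x y : Int) => if x ≠ y then c + 1 else c) trend 0
  rw [pairsRec_cnt] at hp
  simpa using hp

lemma counterA_at (hourly : List (List Int)) (k : Nat) :
    pvCounterA hourly (k : Int)
      = pvCount
          (if k = 0 then none
           else some (PySem.List.pyGetD (hourly.getD (k - 1) []) (-1) 0))
          (hourly.getD k []) := by
  simp only [pvCounterA]
  rw [foldl_app_singleton]
  rw [trend_eq, cnt_eq]
  rw [PySem.List.pyGetD_natCast]
  cases k with
  | zero =>
    rw [pvCount_eq]
    simp [pvSgnFrom]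
  | succ m =>
    have h1 : ((m + 1 : Nat) : Int) > 0 := by positivity
    rw [if_pos h1, if_neg (Nat.succ_ne_zero m)]
    rw [show ((m + 1 : Nat) : Int) - 1 = ((m : Nat) : Int) from by push_cast; ring]
    rw [PySem.List.pyGetD_natCast]
    rw [pvCount_eq]
    simp only [Nat.add_sub_cancel]
    rw [show ([PySem.List.pyGetD (hourly.getD m []) (-1) 0] ++ ([] ++ hourly.getD (m + 1) []))
        = PySem.List.pyGetD (hourly.getD m []) (-1) 0 :: hourly.getD (m + 1) [] from by simp]
    rw [show pvSgnFrom none (PySem.List.pyGetD (hourly.getD m []) (-1) 0 :: hourly.getD (m + 1) [])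
        = pvSgnFrom (some (PySem.List.pyGetD (hourly.getD m []) (-1) 0)) (hourly.getD (m + 1) [])
      from by simp [pvSgnFrom]]

lemma pvA2_eq (h0 : List Int) (rl : List (List Int)) (hne : h0 ≠ [])
    (hall : ∀ x ∈ rl, x ≠ []) :
    pvA2 (h0 :: rl)
      = pvCount none h0 :: pvGoRec rl (some (PySem.List.pyGetD h0 (-1) 0)) := by
  unfold pvA2
  rw [bridge_range]
  have htn : ((((h0 :: rl).length : Int)) - 0).toNat = rl.length + 1 := by simp
  rw [htn]
  rw [List.foldl_ext _ _
    (g := fun (acc : List Int) (k : Nat) =>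
      acc ++ [pvCount
        (if k = 0 then none
         else some (PySem.List.pyGetD ((h0 :: rl).getD (k - 1) []) (-1) 0))
        ((h0 :: rl).getD k [])])
    (by
      intro a k _
      simp only [zero_add]
      rw [counterA_at])]
  rw [List.range_succ_eq_map, List.foldl_cons, List.foldl_map]
  rw [show (if (0 : Nat) = 0 then (none : Option Int)
      else some (PySem.List.pyGetD ((h0 :: rl).getD (0 - 1) []) (-1) 0)) = none from by simp]
  rw [List.foldl_ext _ _
    (g := fun (acc : List Int) (k : Nat) =>
      pvGO acc ((h0 :: rl).getD k []) ((h0 :: rl).getD (k + 1) []))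
    (by
      intro a k _
      simp [pvGO, Nat.succ_ne_zero])]
  have hp := pairs_fold ([] : List Int) pvGO (h0 :: rl)
    ([] ++ [pvCount none ((h0 :: rl).getD 0 [])])
  simp only [List.length_cons, Nat.add_sub_cancel] at hp
  rw [hp]
  rw [outer_rec rl h0 _ hne hall]
  simp

theorem main_eq (ts : List (Int × Int)) (h : ts ≠ []) :
    hourly_trend_changes ts = hourly_trend_changes_alt ts := by
  rw [port_decomp, pvA1_eq_runs ts h]
  obtain ⟨⟨t, v⟩, rest, rfl⟩ : ∃ x r, ts = x :: r := by
    cases ts with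
    | nil => exact absurd rfl h
    | cons x r => exact ⟨x, r, rfl⟩
  rw [pvRuns_cons]
  have hne : (v :: (pvTakeRun (pvHourKey t) rest).1) ≠ [] := by simp
  have hall : ∀ x ∈ pvRuns (pvTakeRun (pvHourKey t) rest).2, x ≠ [] :=
    fun x hx => pvRuns_ne_nil _ x hx
  rw [pvA2_eq _ _ hne hall]
  unfold hourly_trend_changes_alt
  rw [altFold_eq, pvRuns_cons, pvGoRec]
  rw [pyGet?_of_ne_nil _ hne]
  simp

-- ===== VERDICT (by name: the statement is the Claim_ definition above) =====
theorem hourly_trend_changes_spec : Claim_equal_hourly_trend_changes := by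
  intro ts _ hpre
  unfold Spec_hourly_trend_changes
  exact main_eq ts hpre

theorem hourly_trend_changes_raises : Claim_raises_hourly_trend_changes := by
  unfold Claim_raises_hourly_trend_changes
  refine ⟨fun l _ h => by simp [Raises_hourly_trend_changes] at h; simp [h, Pre_hourly_trend_changes], by decide, by decide, ?_⟩
  simp [hourly_trend_changes_alt, pvRaiseWitness_hourly_trend_changes, pvRaiseWitnessOut_hourly_trend_changes, pvRuns]

-- self-check: the recorded raise-witness output is exactly what the claim proves for B
theorem pvRaiseWitnessOut_ok :
    hourly_trend_changes_alt pvRaiseWitness_hourly_trend_changes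
      = pvRaiseWitnessOut_hourly_trend_changes := by
  have h := hourly_trend_changes_raises
  unfold Claim_raises_hourly_trend_changes at h
  exact h.2.2.2
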